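-- pv_equiv track=rewrite | github.com/flaneuseh/logic_puzzles | LogicPuzzles.py | _grid_is_complete
-- ===== SOURCE A (Python) =====
-- def _grid_is_complete(grid):
--   """
--      Check that there is exactly 1 "O"s
--   for each row and column in a grid
--   """
--   #check rows
--   rows_valid = [row.count("O") == 1 for row in grid]
--   if False in rows_valid:
--     return False
--
--   # check columns
--   for i in range(len(grid[0])):
--     c = 0
--     for row in grid:
--       if row[i] == "O":
--         c += 1
--     if c != 1:
--       return False
--
--   return True
-- ===== SOURCE B (Python) =====
-- def _grid_is_complete(grid):
--   # row check first (same short-circuit as A), then one accumulating pass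
--   # over the rows maintaining a per-column count vector, then verify it.
--   if any(row.count("O") != 1 for row in grid):
--     return False
--   n = len(grid[0])
--   col_counts = [0] * n
--   for row in grid:
--     col_counts = [col_counts[i] + (1 if row[i] == "O" else 0) for i in range(n)]
--   return all(c == 1 for c in col_counts)
-- ===== Notes on version B (the rewrite author's own statement) =====
-- stated objective: alternative
-- what changed: A's column phase scans the whole grid once per column (column-major, early return per column); B replaces it with a single row-major accumulating pass that maintains a per-column count vector and verifies it at the end.
-- outside the precondition, e.g. on _grid_is_complete([['O', 'X', 'X'], ['O'], ['X', '.', 'O']]): A returns False, B raises IndexError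
import Mathlib
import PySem

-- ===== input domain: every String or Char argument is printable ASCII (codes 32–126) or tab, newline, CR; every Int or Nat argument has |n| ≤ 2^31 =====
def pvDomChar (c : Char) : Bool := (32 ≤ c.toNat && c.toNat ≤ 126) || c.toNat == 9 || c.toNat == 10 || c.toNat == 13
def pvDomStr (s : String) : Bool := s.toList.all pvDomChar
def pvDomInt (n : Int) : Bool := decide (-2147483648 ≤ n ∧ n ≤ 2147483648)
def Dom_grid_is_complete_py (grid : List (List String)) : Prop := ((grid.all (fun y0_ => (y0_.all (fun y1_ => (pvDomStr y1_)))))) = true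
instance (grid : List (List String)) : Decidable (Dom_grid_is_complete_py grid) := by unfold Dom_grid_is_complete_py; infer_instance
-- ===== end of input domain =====

-- B replaces A's column-major per-column scans with one row-major accumulating pass
-- over a per-column count vector; same cost, different traversal (objective: alternative).


-- ===== PORT A =====
-- c accumulation of the inner 'for row in grid: if row[i] == "O": c += 1' loop;
-- row[i] is ported with pyGetD (exact under Pre_, which puts every index in range)
def pvColCount (grid : List (List String)) (i : Int) : Int :=
  grid.foldl (fun c row => if PySem.List.pyGetD row i "" == "O" then c + 1 else c) 0

-- the 'for i in range(len(grid[0]))' loop with its early 'return False'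
def pvColsLoop (grid : List (List String)) : List Int → Bool
  | [] => true
  | i :: rest => if pvColCount grid i != 1 then false else pvColsLoop grid rest

def grid_is_complete_py (grid : List (List String)) : Bool :=
  let rows_valid := grid.map (fun row => PySem.List.count row "O" == 1)
  if rows_valid.contains false then false
  else pvColsLoop grid (PySem.List.pyRange 0 ((grid.headD []).length : Int) 1)
    -- len(grid[0]): grid[0] raises on [] in Python; headD [] is exact under Pre_

-- ===== PORT B =====
-- one row of B's accumulating pass: the list comprehension rebuilding col_counts
def pvStep (n : Nat) (counts : List Int) (row : List String) : List Int :=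
  (PySem.List.pyRange 0 (n : Int) 1).map (fun i =>
    PySem.List.pyGetD counts i 0 +
      (if PySem.List.pyGetD row i "" == "O" then (1 : Int) else 0))

def grid_is_complete_py_alt (grid : List (List String)) : Bool :=
  if grid.any (fun row => PySem.List.count row "O" != 1) then false
  else
    let n := (grid.headD []).length
    let counts := grid.foldl (pvStep n) (List.replicate n (0 : Int))
    counts.all (fun c => c == 1)

-- ===== PRECONDITION & SPEC =====
-- Pre_ excludes exactly the grids whose column phase indexes out of range once every
-- row has exactly one "O" (empty grid, or a row shorter than the first row): A raises
-- IndexError there or — when an earlier column already fails — returns False while B's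
-- row-major pass raises IndexError.
def Pre_grid_is_complete_py (grid : List (List String)) : Prop :=
  (∀ row ∈ grid, PySem.List.count row "O" = 1) →
    (grid ≠ [] ∧ ∀ row ∈ grid, (grid.headD []).length ≤ row.length)
instance (grid : List (List String)) : Decidable (Pre_grid_is_complete_py grid) := by
  unfold Pre_grid_is_complete_py; infer_instance

def pvWitness_grid_is_complete_py : List (List String) := [["O", "X"], ["X", "O"]]

def Spec_grid_is_complete_py (grid : List (List String)) (out : Bool) : Prop := out = grid_is_complete_py_alt grid
instance (grid : List (List String)) (out : Bool) : Decidable (Spec_grid_is_complete_py grid out) := by unfold Spec_grid_is_complete_py; infer_instance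

-- ===== CLAIM (what is proved, stated in full; the proofs are below) =====
def Claim_equal_grid_is_complete_py : Prop := ∀ (grid : List (List String)), Dom_grid_is_complete_py grid → Pre_grid_is_complete_py grid → Spec_grid_is_complete_py grid (grid_is_complete_py grid)

-- ===== LEMMAS AND PROOFS =====

-- the two row checks agree
theorem pv_rows_check (grid : List (List String)) :
    (grid.map (fun row => PySem.List.count row "O" == 1)).contains false
      = grid.any (fun row => PySem.List.count row "O" != 1) := by
  induction grid with
  | nil => rfl
  | cons r rs ih =>
    simp only [List.map_cons, List.contains_cons, List.any_cons, ih]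
    simp [bne]

-- restarting the c-accumulator at c instead of 0 just adds c
theorem pv_colCount_from (grid : List (List String)) (i : Int) (c : Int) :
    grid.foldl (fun c row => if PySem.List.pyGetD row i "" == "O" then c + 1 else c) c
      = c + pvColCount grid i := by
  induction grid generalizing c with
  | nil => simp [pvColCount]
  | cons r rs ih =>
    simp only [pvColCount, List.foldl_cons]
    rw [ih, ih]
    split <;> ring

theorem pv_colCount_cons (r : List String) (rs : List (List String)) (i : Int) :
    pvColCount (r :: rs) i
      = (if PySem.List.pyGetD r i "" == "O" then (1 : Int) else 0) + pvColCount rs i := by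
  conv_lhs => rw [pvColCount, List.foldl_cons]
  rw [pv_colCount_from]
  split <;> ring

-- B's accumulating pass computes exactly A's column counts
theorem pv_fold_step (n : Nat) (grid : List (List String)) :
    ∀ f : Int → Int,
      grid.foldl (pvStep n) ((PySem.List.pyRange 0 (n : Int) 1).map f)
        = (PySem.List.pyRange 0 (n : Int) 1).map (fun i => f i + pvColCount grid i) := by
  induction grid with
  | nil => intro f; simp [pvColCount]
  | cons r rs ih =>
    intro f
    have hstep : pvStep n ((PySem.List.pyRange 0 (n : Int) 1).map f) r
        = (PySem.List.pyRange 0 (n : Int) 1).map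
            (fun i => f i + (if PySem.List.pyGetD r i "" == "O" then (1 : Int) else 0)) := by
      unfold pvStep
      refine List.map_congr_left ?_
      intro i hi
      rw [PySem.List.mem_pyRange_one] at hi
      rw [PySem.List.pyGetD_map_pyRange_of_nonneg f (n : Int) i 0 hi.1 hi.2]
    simp only [List.foldl_cons, hstep, ih]
    refine List.map_congr_left ?_
    intro i _
    rw [pv_colCount_cons]
    ring

-- A's column loop is an 'all' over the column indices
theorem pv_colsLoop_all (grid : List (List String)) (l : List Int) :
    pvColsLoop grid l = l.all (fun i => pvColCount grid i == 1) := by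
  induction l with
  | nil => rfl
  | cons i rest ih =>
    simp only [pvColsLoop, ih, List.all_cons]
    by_cases h : pvColCount grid i = 1 <;> simp [h]

-- ===== VERDICT (by name: the statement is the Claim_ definition above) =====
theorem grid_is_complete_py_spec : Claim_equal_grid_is_complete_py := by
  intro grid _ _
  unfold Spec_grid_is_complete_py
  simp only [grid_is_complete_py, grid_is_complete_py_alt]
  rw [pv_rows_check]
  by_cases h : grid.any (fun row => PySem.List.count row "O" != 1) = true
  · rw [if_pos h, if_pos h]
  · simp only [Bool.not_eq_true] at h
    simp only [h, Bool.false_eq_true, if_false]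
    rw [show (List.replicate ((grid.headD []).length) (0 : Int))
          = (PySem.List.pyRange 0 ((grid.headD []).length : Int) 1).map (fun _ => (0 : Int)) by
        rw [List.map_const', PySem.List.length_pyRange_one]; norm_num]
    rw [pv_fold_step, pv_colsLoop_all, List.all_map]
    simp [Function.comp_def]
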